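-- pv_equiv track=rewrite | github.com/wolfdan666/WolfEat3moreMeatEveryday | 2019.8/2019.8.17/B_std.py | f
-- ===== SOURCE A (Python) =====
-- lf = [0, 6, 7]
--
-- def f(x, s) :
--     if x == 1 :
--         return "COFFEE"[s]
--     if x == 2 :
--         return "CHICKEN"[s]
--     if s >= lf[x-2] :
--         return f(x - 1, s - lf[x - 2])
--     else :
--         return f(x - 2, s)
-- ===== SOURCE B (Python) =====
-- lf = [0, 6, 7]
--
-- def f(x, s):
--     # iterative state machine over (x, s) instead of tail recursion
--     while x != 1 and x != 2:
--         if s >= lf[x - 2]: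
--             s -= lf[x - 2]
--             x -= 1
--         else:
--             x -= 2
--     return "COFFEE"[s] if x == 1 else "CHICKEN"[s]
-- ===== Notes on version B (the rewrite author's own statement) =====
-- stated objective: idiomatic
-- what changed: Replaced the tail recursion by an explicit while-loop that maintains only the pair (x, s) and does a single string indexing after the loop.
import Mathlib
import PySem

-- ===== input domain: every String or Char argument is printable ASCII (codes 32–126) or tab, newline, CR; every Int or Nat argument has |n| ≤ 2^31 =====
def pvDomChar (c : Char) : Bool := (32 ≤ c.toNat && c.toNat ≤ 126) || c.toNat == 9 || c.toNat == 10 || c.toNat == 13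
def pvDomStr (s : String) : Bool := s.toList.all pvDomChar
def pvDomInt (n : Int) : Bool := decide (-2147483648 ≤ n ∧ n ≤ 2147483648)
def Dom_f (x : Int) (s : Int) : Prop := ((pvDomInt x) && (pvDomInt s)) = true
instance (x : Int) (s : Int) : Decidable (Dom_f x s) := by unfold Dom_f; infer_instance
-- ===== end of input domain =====

-- B replaces A's tail recursion by an explicit loop over the state (x, s); same values, constant stack.
-- ===== PORT A =====
def lf : List Int := [0, 6, 7]

-- fuel makes the recursion total; it is never exhausted inside Pre_f
def fAux : Nat → Int → Int → String
  | 0, _, _ => ""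
  | fuel+1, x, s =>
    if x = 1 then
      match PySem.Str.pyGet? "COFFEE" s with
      | some c => String.mk [c]
      | none => ""
    else if x = 2 then
      match PySem.Str.pyGet? "CHICKEN" s with
      | some c => String.mk [c]
      | none => ""
    else
      match PySem.List.pyGet? lf (x - 2) with
      | none => ""
      | some v => if s ≥ v then fAux fuel (x - 1) (s - v) else fAux fuel (x - 2) s

def f (x : Int) (s : Int) : String := fAux 8 x s

-- ===== PORT B =====
-- the while-loop: returns the final state (x, s); none = IndexError / fuel exhausted (outside Pre_f)
def fAltLoop : Nat → Int → Int → Option (Int × Int)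
  | 0, _, _ => none
  | fuel+1, x, s =>
    if x ≠ 1 ∧ x ≠ 2 then
      match PySem.List.pyGet? lf (x - 2) with
      | none => none
      | some v =>
        if s ≥ v then fAltLoop fuel (x - 1) (s - v) else fAltLoop fuel (x - 2) s
    else some (x, s)

def f_alt (x : Int) (s : Int) : String :=
  match fAltLoop 8 x s with
  | none => ""
  | some (x, s) =>
    match PySem.Str.pyGet? (if x = 1 then "COFFEE" else "CHICKEN") s with
    | some c => String.mk [c]
    | none => ""

-- ===== PRECONDITION & SPEC =====
-- Pre_f is exactly the set of inputs on which the Python A returns normally (everywhere else it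
-- raises IndexError or RecursionError); it includes the negative-s wraparound indices Python accepts.
def Pre_f (x : Int) (s : Int) : Prop :=
  (x = 1 ∧ -6 ≤ s ∧ s ≤ 5) ∨ (x = 2 ∧ -7 ≤ s ∧ s ≤ 6) ∨
  (x = 3 ∧ -6 ≤ s ∧ s ≤ 12) ∨ (x = 4 ∧ -7 ≤ s ∧ s ≤ 19)
instance (x : Int) (s : Int) : Decidable (Pre_f x s) := by unfold Pre_f; infer_instance
def pvWitness_f : Int × Int := (4, 10)
def Spec_f (x : Int) (s : Int) (out : String) : Prop := out = f_alt x s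
instance (x : Int) (s : Int) (out : String) : Decidable (Spec_f x s out) := by unfold Spec_f; infer_instance

-- ===== CLAIM (what is proved, stated in full; the proofs are below) =====
def Claim_equal_f : Prop := ∀ (x : Int) (s : Int), Dom_f x s → Pre_f x s → Spec_f x s (f x s)

-- ===== LEMMAS AND PROOFS =====

-- ===== VERDICT (by name: the statement is the Claim_ definition above) =====
theorem f_spec : Claim_equal_f := by
  intro x s _ hp
  unfold Spec_f
  rcases hp with ⟨rfl, h1, h2⟩ | ⟨rfl, h1, h2⟩ | ⟨rfl, h1, h2⟩ | ⟨rfl, h1, h2⟩ <;>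
    interval_cases s <;> rfl
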